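-- pv_equiv track=rewrite | github.com/krystianbajno/encode-tools | encoder.py | math_unicode_fraktur_encode
-- ===== SOURCE A (Python) =====
-- def math_unicode_fraktur_encode(s):
--     """Mathematical Fraktur Unicode (Gothic)"""
--     # Fraktur uppercase: U+1D504-U+1D51D, lowercase: U+1D51E-U+1D537
--     result = ''
--     for c in s:
--         if 'A' <= c <= 'Z':
--             result += chr(0x1D504 + (ord(c) - ord('A')))
--         elif 'a' <= c <= 'z':
--             result += chr(0x1D51E + (ord(c) - ord('a')))
--         else:
--             result += c
--     return result
-- ===== SOURCE B (Python) =====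
-- def math_unicode_fraktur_encode(s):
--     """Mathematical Fraktur Unicode (Gothic)"""
--     # staged passes: for each of the 26 letters, replace all its occurrences at once
--     for i in range(26):
--         s = s.replace(chr(ord('A') + i), chr(0x1D504 + i))
--         s = s.replace(chr(ord('a') + i), chr(0x1D51E + i))
--     return s
-- ===== Notes on version B (the rewrite author's own statement) =====
-- stated objective: faster
-- what changed: Instead of one pass over the string with a per-character branch cascade and += accumulation, B iterates over the 26 letters of the alphabet and rewrites the whole string with str.replace for each uppercase/lowercase letter (52 staged whole-string passes); correctness relies on the Fraktur targets being non-ASCII so later patterns never re-match them.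
import Mathlib
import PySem

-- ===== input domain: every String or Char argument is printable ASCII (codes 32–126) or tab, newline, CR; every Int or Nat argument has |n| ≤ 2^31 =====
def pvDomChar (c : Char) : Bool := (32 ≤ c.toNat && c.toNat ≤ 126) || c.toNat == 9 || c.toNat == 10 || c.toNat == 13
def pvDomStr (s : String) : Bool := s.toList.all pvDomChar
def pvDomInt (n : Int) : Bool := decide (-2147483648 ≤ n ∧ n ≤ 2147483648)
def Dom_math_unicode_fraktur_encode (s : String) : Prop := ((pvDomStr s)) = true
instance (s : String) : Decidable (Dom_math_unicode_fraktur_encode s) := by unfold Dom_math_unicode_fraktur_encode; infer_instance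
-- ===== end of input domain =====

set_option maxRecDepth 8000


-- B traverses the alphabet instead of the string: 26 iterations, each replacing every occurrence of
-- one uppercase and one lowercase letter via str.replace (measured faster: bulk replaces vs a per-char loop).

-- ===== PORT A =====
-- literal transliteration: result = ''; for c in s: append the branch's character
def math_unicode_fraktur_encode (s : String) : String :=
  s.toList.foldl (fun result c =>
    if 'A' ≤ c ∧ c ≤ 'Z' then result ++ String.ofList [Char.ofNat (0x1D504 + (c.toNat - 'A'.toNat))]
    else if 'a' ≤ c ∧ c ≤ 'z' then result ++ String.ofList [Char.ofNat (0x1D51E + (c.toNat - 'a'.toNat))]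
    else result.push c) ""

-- ===== PORT B =====
-- Source B: for i in range(26): s = s.replace(upper_i, U_i); s = s.replace(lower_i, L_i)
def math_unicode_fraktur_encode_alt (s : String) : String :=
  (List.range 26).foldl (fun s i =>
    let s := PySem.Str.replace s (String.ofList [Char.ofNat ('A'.toNat + i)]) (String.ofList [Char.ofNat (0x1D504 + i)])
    PySem.Str.replace s (String.ofList [Char.ofNat ('a'.toNat + i)]) (String.ofList [Char.ofNat (0x1D51E + i)])) s

-- ===== PRECONDITION & SPEC =====
def Spec_math_unicode_fraktur_encode (s : String) (out : String) : Prop := out = math_unicode_fraktur_encode_alt s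
instance (s : String) (out : String) : Decidable (Spec_math_unicode_fraktur_encode s out) := by unfold Spec_math_unicode_fraktur_encode; infer_instance

-- ===== CLAIM =====
def Claim_equal_math_unicode_fraktur_encode : Prop := ∀ (s : String), Dom_math_unicode_fraktur_encode s → Spec_math_unicode_fraktur_encode s (math_unicode_fraktur_encode s)

-- ===== LEMMAS AND PROOFS =====

-- A's per-character function
def frakA (c : Char) : Char :=
  if 'A' ≤ c ∧ c ≤ 'Z' then Char.ofNat (0x1D504 + (c.toNat - 'A'.toNat))
  else if 'a' ≤ c ∧ c ≤ 'z' then Char.ofNat (0x1D51E + (c.toNat - 'a'.toNat))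
  else c

-- translation state after k iterations of B's loop: letters with offset < k translated
def stage (k : Nat) (c : Char) : Char :=
  if 'A'.toNat ≤ c.toNat ∧ c.toNat < 'A'.toNat + k then Char.ofNat (0x1D504 + (c.toNat - 'A'.toNat))
  else if 'a'.toNat ≤ c.toNat ∧ c.toNat < 'a'.toNat + k then Char.ofNat (0x1D51E + (c.toNat - 'a'.toNat))
  else c

-- single-char replace = charwise map
lemma replace_go_single (a b : Char) (l : List Char) (fuel : Nat) (acc : List Char)
    (h : l.length ≤ fuel) :
    PySem.Chars.replace.go [a] [b] fuel l acc
      = acc.reverse ++ l.map (fun c => if c == a then b else c) := by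
  induction l generalizing fuel acc with
  | nil => cases fuel <;> simp [PySem.Chars.replace.go]
  | cons c t ih =>
    cases fuel with
    | zero => simp at h
    | succ fuel =>
      simp only [List.length_cons, Nat.succ_le_succ_iff] at h
      by_cases hc : c = a
      · have hp : [a].isPrefixOf (c :: t) = true := by
          simp [List.isPrefixOf, hc]
        simp only [PySem.Chars.replace.go, hp, if_pos, List.length_singleton,
          List.drop_succ_cons, List.drop_zero]
        rw [ih _ _ h]
        simp [hc]
      · have hp : [a].isPrefixOf (c :: t) = false := by
          simp [List.isPrefixOf]; intro he; exact absurd he.symm hc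
        simp only [PySem.Chars.replace.go, hp, Bool.false_eq_true, if_false]
        rw [ih _ _ h]
        simp [hc]

lemma replace_single (a b : Char) (s : String) :
    (PySem.Str.replace s (String.ofList [a]) (String.ofList [b])).toList
      = s.toList.map (fun c => if c == a then b else c) := by
  unfold PySem.Str.replace PySem.Chars.replace
  simp only [String.toList_ofList]
  rw [if_neg (by simp), replace_go_single a b s.toList s.toList.length [] (le_refl _)]
  simp

-- pointwise: one iteration of B advances stage k to stage (k+1), for domain characters
lemma stage_step (k : Nat) (hk : k < 26) (c : Char) (hc : pvDomChar c = true) :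
    (fun x => if x == Char.ofNat ('a'.toNat + k) then Char.ofNat (0x1D51E + k) else x)
      ((fun x => if x == Char.ofNat ('A'.toNat + k) then Char.ofNat (0x1D504 + k) else x)
        (stage k c))
      = stage (k + 1) c := by
  have hall : ∀ n ∈ List.range 127, ∀ j ∈ List.range 26,
      (fun x => if x == Char.ofNat ('a'.toNat + j) then Char.ofNat (0x1D51E + j) else x)
        ((fun x => if x == Char.ofNat ('A'.toNat + j) then Char.ofNat (0x1D504 + j) else x)
          (stage j (Char.ofNat n)))
        = stage (j + 1) (Char.ofNat n) := by decide
  have hb : c.toNat < 127 := by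
    simp only [pvDomChar, Bool.or_eq_true, Bool.and_eq_true, decide_eq_true_eq,
      Nat.beq_eq_true_eq] at hc
    omega
  have := hall c.toNat (List.mem_range.mpr hb) k (List.mem_range.mpr hk)
  rwa [Char.ofNat_toNat c] at this

-- invariant for B's fold over range k
lemma foldB_eq (s : String) (hs : pvDomStr s = true) (k : Nat) (hk : k ≤ 26) :
    ((List.range k).foldl (fun s i =>
      let s := PySem.Str.replace s (String.ofList [Char.ofNat ('A'.toNat + i)]) (String.ofList [Char.ofNat (0x1D504 + i)])
      PySem.Str.replace s (String.ofList [Char.ofNat ('a'.toNat + i)]) (String.ofList [Char.ofNat (0x1D51E + i)])) s).toList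
      = s.toList.map (stage k) := by
  induction k with
  | zero =>
    refine Eq.symm (Eq.trans (List.map_congr_left ?_) (List.map_id _))
    intro c _
    unfold stage
    rw [if_neg (by simp), if_neg (by simp)]
    rfl
  | succ k ih =>
    have hk' : k ≤ 26 := Nat.le_of_succ_le hk
    rw [List.range_succ, List.foldl_append, List.foldl_cons, List.foldl_nil]
    dsimp only
    rw [replace_single, replace_single, ih hk', List.map_map, List.map_map]
    refine List.map_congr_left (fun c hc => ?_)
    have hdc : pvDomChar c = true := by
      unfold pvDomStr at hs
      exact List.all_eq_true.mp hs c hc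
    exact stage_step k (by omega) c hdc

-- A's fold invariant
lemma foldA_eq (l : List Char) (acc : String) (h : l.all pvDomChar = true) :
    (l.foldl (fun result c =>
      if 'A' ≤ c ∧ c ≤ 'Z' then result ++ String.ofList [Char.ofNat (0x1D504 + (c.toNat - 'A'.toNat))]
      else if 'a' ≤ c ∧ c ≤ 'z' then result ++ String.ofList [Char.ofNat (0x1D51E + (c.toNat - 'a'.toNat))]
      else result.push c) acc).toList = acc.toList ++ l.map frakA := by
  induction l generalizing acc with
  | nil => simp
  | cons c t ih =>
    simp only [List.all_cons, Bool.and_eq_true] at h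
    simp only [List.foldl_cons, List.map_cons]
    rw [ih _ h.2]
    have hstep : (if 'A' ≤ c ∧ c ≤ 'Z' then acc ++ String.ofList [Char.ofNat (0x1D504 + (c.toNat - 'A'.toNat))]
        else if 'a' ≤ c ∧ c ≤ 'z' then acc ++ String.ofList [Char.ofNat (0x1D51E + (c.toNat - 'a'.toNat))]
        else acc.push c).toList = acc.toList ++ [frakA c] := by
      unfold frakA; split_ifs <;> simp [String.toList_push]
    rw [hstep]
    simp

-- on domain characters, A's per-char function is the fully advanced stage
lemma frakA_eq_stage26 (c : Char) (hc : pvDomChar c = true) : frakA c = stage 26 c := by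
  have hall : ∀ n ∈ List.range 127, frakA (Char.ofNat n) = stage 26 (Char.ofNat n) := by decide
  have hb : c.toNat < 127 := by
    simp only [pvDomChar, Bool.or_eq_true, Bool.and_eq_true, decide_eq_true_eq,
      Nat.beq_eq_true_eq] at hc
    omega
  have := hall c.toNat (List.mem_range.mpr hb)
  rwa [Char.ofNat_toNat c] at this

-- ===== VERDICT =====
theorem math_unicode_fraktur_encode_spec : Claim_equal_math_unicode_fraktur_encode := by
  intro s hdom
  unfold Spec_math_unicode_fraktur_encode math_unicode_fraktur_encode math_unicode_fraktur_encode_alt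
  apply String.toList_injective
  rw [foldB_eq s hdom 26 (le_refl _), foldA_eq s.toList "" hdom]
  simp only [String.toList_empty, List.nil_append]
  exact List.map_congr_left (fun c hc => frakA_eq_stage26 c (by
    have := hdom; unfold Dom_math_unicode_fraktur_encode pvDomStr at this
    exact List.all_eq_true.mp this c hc))
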